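-- pv_equiv track=rewrite | github.com/brykalov69/lottery-designer-web | backend/services/generator.py | has_four_in_row
-- ===== SOURCE A (Python) =====
-- def has_four_in_row(combo):
--     """Disallow sequences like 7,8,9,10."""
--     for i in range(len(combo) - 3):
--         if (
--             combo[i + 1] == combo[i] + 1
--             and combo[i + 2] == combo[i] + 2
--             and combo[i + 3] == combo[i] + 3
--         ):
--             return True
--     return False
-- ===== SOURCE B (Python) =====
-- def has_four_in_row(combo):
--     """Disallow sequences like 7,8,9,10."""
--     run = 1
--     for j in range(1, len(combo)):
--         if combo[j] == combo[j - 1] + 1: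
--             run += 1
--             if run == 4:
--                 return True
--         else:
--             run = 1
--     return False
-- ===== Notes on version B (the rewrite author's own statement) =====
-- stated objective: alternative
-- what changed: Replaced the sliding-window check of three fixed offsets per anchor index with a single-pass run-length counter over adjacent pairs that returns True once the run of unit increments reaches length 4.
import Mathlib
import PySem

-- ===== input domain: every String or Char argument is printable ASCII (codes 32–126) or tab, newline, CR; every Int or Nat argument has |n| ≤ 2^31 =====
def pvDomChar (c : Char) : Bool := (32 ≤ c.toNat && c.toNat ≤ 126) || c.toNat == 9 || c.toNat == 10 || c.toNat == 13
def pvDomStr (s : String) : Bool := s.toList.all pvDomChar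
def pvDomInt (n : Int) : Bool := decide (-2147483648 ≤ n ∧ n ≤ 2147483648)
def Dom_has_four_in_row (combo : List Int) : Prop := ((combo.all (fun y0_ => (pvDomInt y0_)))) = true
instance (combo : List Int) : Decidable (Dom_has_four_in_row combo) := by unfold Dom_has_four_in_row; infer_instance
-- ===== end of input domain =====

-- B replaces A's per-anchor window check (three fixed offsets) with a single-pass
-- run-length counter of consecutive unit increments; same O(n) cost, different decomposition.


-- ===== PORT A =====
-- the body of A's loop at anchor x with the rest of the list t:
-- combo[i+1] == combo[i]+1 and combo[i+2] == combo[i]+2 and combo[i+3] == combo[i]+3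
def hfrCheck (x : Int) (t : List Int) : Bool :=
  match t with
  | y :: z :: w :: _ => y == x + 1 && z == x + 2 && w == x + 3
  | _ => false

-- A's for-loop over anchors i = 0 .. len-4, as the scan over suffixes; early
-- `return True` becomes `||`.
def has_four_in_row (combo : List Int) : Bool :=
  match combo with
  | [] => false
  | x :: t => hfrCheck x t || has_four_in_row t

-- ===== PORT B =====
-- B's loop over j = 1 .. len-1: prev = combo[j-1], run = current run length
def hfrAltLoop (prev run : Int) (rest : List Int) : Bool :=
  match rest with
  | [] => false
  | x :: t =>
      if x == prev + 1 then
        if run + 1 == 4 then true else hfrAltLoop x (run + 1) t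
      else hfrAltLoop x 1 t

def has_four_in_row_alt (combo : List Int) : Bool :=
  match combo with
  | [] => false
  | x :: t => hfrAltLoop x 1 t

-- ===== PRECONDITION & SPEC =====
def Spec_has_four_in_row (combo : List Int) (out : Bool) : Prop := out = has_four_in_row_alt combo
instance (combo : List Int) (out : Bool) : Decidable (Spec_has_four_in_row combo out) := by unfold Spec_has_four_in_row; infer_instance

-- ===== CLAIM (what is proved, stated in full; the proofs are below) =====
def Claim_equal_has_four_in_row : Prop := ∀ (combo : List Int), Dom_has_four_in_row combo → Spec_has_four_in_row combo (has_four_in_row combo)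

-- ===== LEMMAS AND PROOFS =====

-- One-step unfoldings of the two loops on a cons cell
theorem A_cons (a : Int) (l : List Int) :
    has_four_in_row (a :: l) = (hfrCheck a l || has_four_in_row l) := rfl

theorem B_cons (prev run x : Int) (t : List Int) :
    hfrAltLoop prev run (x :: t) =
      (if x == prev + 1 then
        if run + 1 == 4 then true else hfrAltLoop x (run + 1) t
      else hfrAltLoop x 1 t) := rfl

-- The window check fails when the (k+1)-th step is not a unit increment
theorem check_false_1 (a x : Int) (t : List Int) (h : x ≠ a + 1) :
    hfrCheck a (x :: t) = false := by
  rcases t with _ | ⟨y, _ | ⟨z, u⟩⟩ <;> simp [hfrCheck] <;> omega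

theorem check_false_2 (a x : Int) (t : List Int) (h : x ≠ a + 2) :
    hfrCheck a ((a + 1) :: x :: t) = false := by
  rcases t with _ | ⟨y, u⟩ <;> simp [hfrCheck] <;> omega

theorem check_false_3 (a x : Int) (t : List Int) (h : x ≠ a + 3) :
    hfrCheck a ((a + 1) :: (a + 2) :: x :: t) = false := by
  simp [hfrCheck]; omega

-- Invariant: a run of length r (r = 1,2,3) whose last element is a behaves like A's
-- window scan on the list extended backwards by the r-1 predecessors of a.
theorem hfrAltLoop_eq (l : List Int) :
    (∀ a : Int, hfrAltLoop a 1 l = has_four_in_row (a :: l)) ∧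
    (∀ b : Int, hfrAltLoop (b + 1) 2 l = has_four_in_row (b :: (b + 1) :: l)) ∧
    (∀ c : Int, hfrAltLoop (c + 2) 3 l = has_four_in_row (c :: (c + 1) :: (c + 2) :: l)) := by
  induction l with
  | nil =>
      refine ⟨fun a => ?_, fun b => ?_, fun c => ?_⟩ <;>
        simp [hfrAltLoop, has_four_in_row, hfrCheck]
  | cons x t ih =>
      obtain ⟨ih1, ih2, ih3⟩ := ih
      refine ⟨fun a => ?_, fun b => ?_, fun c => ?_⟩
      · by_cases h : x = a + 1
        · subst h
          rw [B_cons]; simp only [beq_self_eq_true, if_true]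
          norm_num
          exact ih2 a
        · have hc : (x == a + 1) = false := by simp [h]
          rw [B_cons, hc, A_cons, check_false_1 a x t h, Bool.false_or]
          simp only [Bool.false_eq_true, if_false]
          exact ih1 x
      · by_cases h : x = b + 1 + 1
        · subst h
          rw [B_cons]; simp only [beq_self_eq_true, if_true]
          norm_num
          have e : (b + 1 + 1 : Int) = b + 2 := by ring
          rw [e]
          exact ih3 b
        · have hc : (x == b + 1 + 1) = false := by simp [h]
          have C1 : hfrCheck b ((b + 1) :: x :: t) = false :=
            check_false_2 b x t (by omega)
          have C2 : hfrCheck (b + 1) (x :: t) = false :=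
            check_false_1 (b + 1) x t (by omega)
          rw [B_cons, hc, A_cons, C1, Bool.false_or, A_cons, C2, Bool.false_or]
          simp only [Bool.false_eq_true, if_false]
          exact ih1 x
      · by_cases h : x = c + 2 + 1
        · subst h
          rw [B_cons]; simp only [beq_self_eq_true, if_true]
          norm_num
          rw [A_cons]
          have C : hfrCheck c ((c + 1) :: (c + 2) :: (c + 2 + 1) :: t) = true := by
            simp [hfrCheck]; ring
          rw [C, Bool.true_or]
        · have hc : (x == c + 2 + 1) = false := by simp [h]
          have C1 : hfrCheck c ((c + 1) :: (c + 2) :: x :: t) = false :=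
            check_false_3 c x t (by omega)
          have C2 : hfrCheck (c + 1) ((c + 2) :: x :: t) = false := by
            have e : (c + 2 : Int) = (c + 1) + 1 := by ring
            rw [e]; exact check_false_2 (c + 1) x t (by omega)
          have C3 : hfrCheck (c + 2) (x :: t) = false :=
            check_false_1 (c + 2) x t (by omega)
          rw [B_cons, hc, A_cons, C1, Bool.false_or, A_cons, C2, Bool.false_or,
              A_cons, C3, Bool.false_or]
          simp only [Bool.false_eq_true, if_false]
          exact ih1 x

-- ===== VERDICT (by name: the statement is the Claim_ definition above) =====
theorem has_four_in_row_spec : Claim_equal_has_four_in_row := by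
  intro combo _
  unfold Spec_has_four_in_row
  cases combo with
  | nil => rfl
  | cons x t => exact ((hfrAltLoop_eq t).1 x).symm
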